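-- pv_equiv track=rewrite | github.com/lee-seul/baekjoon | 2448.py | make_triangle
-- ===== SOURCE A (Python) =====
-- def make_triangle(triangle):
--     result = [[" " for col in range(len(triangle[0])*2+1)] for row in range(len(triangle)*2)]
--     x = (len(result[0])//2 - 1) - (len(triangle[0])//2 -1)
--     y = len(triangle)
--     z = len(triangle[0])
--     for i in range(y):
--         for j in range(z):
--             result[i][x+j] = triangle[i][j]
--         for k in range(z*2+1):
--             if k == z:
--                 result[y+i][k] == " "
--             elif k < z:
--                 result[y+i][k] = triangle[i][k%z]
--             else:
--                 result[y+i][k] = triangle[i][k%z-1]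
--     return result
-- ===== SOURCE B (Python) =====
-- def make_triangle(triangle):
--     z = len(triangle[0])
--     x = z - z // 2
--     tops = [[" "] * x + row[:z] + [" "] * (z + 1 - x) for row in triangle]
--     bottoms = [row[:z] + [" "] + row[:z] for row in triangle]
--     return tops + bottoms
-- ===== Notes on version B (the rewrite author's own statement) =====
-- stated objective: simpler
-- what changed: B builds each output row directly by list concatenation (pad + row + pad on top, row + gap + row below) instead of A's allocate-a-2y x (2z+1) space grid and scatter cells into it with offset and modular index arithmetic.
-- intended difference: On inputs whose first row has length z >= 1 and where some row is longer than z with last element different from its element z-1, A's bottom half ends the doubled row with that row's Python row[-1] (the stray last element of the over-long row) while B ends it with row[z-1], the intended mirror of the z-wide row that every other bottom cell follows. — e.g. on make_triangle([["a"], ["b", "c"]]): A returns [[" ", "a", " "], [" ", "b", " "], ["a", " ", "a"], ["b", " ", "c"]], B returns [[" ", "a", " "], [" ", "b", " "], ["a", " ", "a"], ["b", " ", "b"]]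
import Mathlib
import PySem

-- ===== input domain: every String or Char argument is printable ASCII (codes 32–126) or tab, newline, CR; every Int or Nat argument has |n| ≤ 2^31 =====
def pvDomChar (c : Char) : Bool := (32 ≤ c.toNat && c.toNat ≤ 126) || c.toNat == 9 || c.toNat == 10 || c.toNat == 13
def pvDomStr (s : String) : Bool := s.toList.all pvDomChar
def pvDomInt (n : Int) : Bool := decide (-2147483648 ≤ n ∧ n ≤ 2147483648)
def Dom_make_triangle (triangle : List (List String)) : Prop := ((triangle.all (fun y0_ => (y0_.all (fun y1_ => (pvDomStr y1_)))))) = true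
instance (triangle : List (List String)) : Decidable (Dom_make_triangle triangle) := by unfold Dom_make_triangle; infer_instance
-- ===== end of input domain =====

-- B builds each output row directly by concatenation instead of A's scatter-into-a-space-grid; return-value equivalence (A mutates only its local grid).

-- ===== PORT A =====
-- Literal port of A.  Reads/writes use pyGetD/pySetD; on Pre_ every index A touches is in
-- range (or a Python negative index, handled by pyGetD), so the totalised forms are exact there.
def make_triangle (triangle : List (List String)) : List (List String) :=
  let result : List (List String) :=
    (PySem.List.pyRange 0 ((triangle.length : Int) * 2) 1).map (fun _ =>
      (PySem.List.pyRange 0 (((PySem.List.pyGetD triangle 0 []).length : Int) * 2 + 1) 1).map (fun _ => " "))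
  let x : Int := (PySem.Int.floordiv ((PySem.List.pyGetD result 0 []).length : Int) 2 - 1)
                 - (PySem.Int.floordiv ((PySem.List.pyGetD triangle 0 []).length : Int) 2 - 1)
  let y : Int := (triangle.length : Int)
  let z : Int := ((PySem.List.pyGetD triangle 0 []).length : Int)
  (PySem.List.pyRange 0 y 1).foldl (fun result i =>
    let result := (PySem.List.pyRange 0 z 1).foldl (fun result j =>
      PySem.List.pySetD result i
        (PySem.List.pySetD (PySem.List.pyGetD result i []) (x + j)
          (PySem.List.pyGetD (PySem.List.pyGetD triangle i []) j " "))) result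
    (PySem.List.pyRange 0 (z * 2 + 1) 1).foldl (fun result k =>
      if k = z then result   -- A's 'result[y+i][k] == " "' is a bare comparison: no write happens
      else if k < z then
        PySem.List.pySetD result (y + i)
          (PySem.List.pySetD (PySem.List.pyGetD result (y + i) []) k
            (PySem.List.pyGetD (PySem.List.pyGetD triangle i []) (PySem.Int.mod k z) " "))
      else
        PySem.List.pySetD result (y + i)
          (PySem.List.pySetD (PySem.List.pyGetD result (y + i) []) k
            (PySem.List.pyGetD (PySem.List.pyGetD triangle i []) (PySem.Int.mod k z - 1) " "))) result) result

-- ===== PORT B =====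
def make_triangle_alt (triangle : List (List String)) : List (List String) :=
  let z : Nat := (PySem.List.pyGetD triangle 0 []).length
  let x : Nat := z - z / 2
  let tops := triangle.map (fun row =>
    List.replicate x " " ++ PySem.List.slice row none (some (z : Int)) ++ List.replicate (z + 1 - x) " ")
  let bottoms := triangle.map (fun row =>
    PySem.List.slice row none (some (z : Int)) ++ [" "] ++ PySem.List.slice row none (some (z : Int)))
  tops ++ bottoms

-- ===== PRECONDITION & SPEC =====
-- Pre_ excludes exactly the inputs where A raises IndexError: the empty triangle
-- (triangle[0]) and triangles containing a row shorter than the first row (triangle[i][j]).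
def Pre_make_triangle (triangle : List (List String)) : Prop :=
  triangle ≠ [] ∧ ∀ row ∈ triangle, (triangle.headD []).length ≤ row.length
instance (triangle : List (List String)) : Decidable (Pre_make_triangle triangle) := by
  unfold Pre_make_triangle; infer_instance
def pvWitness_make_triangle : List (List String) := [["*"]]

-- On inputs whose first row has length z ≥ 1 and where some row is longer than z with last
-- element different from its element z-1, A ends that row's bottom doubled row with the row's
-- Python row[-1] (the stray last element of the over-long row) while B ends it with row[z-1],
-- the intended mirror of the z-wide row that every other bottom cell follows.
def D_make_triangle (triangle : List (List String)) : Prop :=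
  1 ≤ (triangle.headD []).length ∧
    ∃ row ∈ triangle, (triangle.headD []).length < row.length ∧
      row.getLast? ≠ row[(triangle.headD []).length - 1]?
instance (triangle : List (List String)) : Decidable (D_make_triangle triangle) := by
  unfold D_make_triangle; infer_instance

def Spec_make_triangle (triangle : List (List String)) (out : List (List String)) : Prop :=
  ¬ D_make_triangle triangle → out = make_triangle_alt triangle
instance (triangle : List (List String)) (out : List (List String)) : Decidable (Spec_make_triangle triangle out) := by
  unfold Spec_make_triangle; infer_instance

def pvDiffWitness_make_triangle : List (List String) := [["a"], ["b", "c"]]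
def pvDiffWitnessOut_make_triangle : (List (List String)) × (List (List String)) :=
  ([[" ", "a", " "], [" ", "b", " "], ["a", " ", "a"], ["b", " ", "c"]],
   [[" ", "a", " "], [" ", "b", " "], ["a", " ", "a"], ["b", " ", "b"]])

-- ===== CLAIM (what is proved, stated in full; the proofs are below) =====
def Claim_unchanged_make_triangle : Prop := ∀ (triangle : List (List String)), Dom_make_triangle triangle → Pre_make_triangle triangle → Spec_make_triangle triangle (make_triangle triangle)
def Claim_changed_make_triangle : Prop := Dom_make_triangle (pvDiffWitness_make_triangle) ∧ Pre_make_triangle (pvDiffWitness_make_triangle) ∧ D_make_triangle (pvDiffWitness_make_triangle) ∧ make_triangle (pvDiffWitness_make_triangle) = pvDiffWitnessOut_make_triangle.1 ∧ make_triangle_alt (pvDiffWitness_make_triangle) = pvDiffWitnessOut_make_triangle.2 ∧ pvDiffWitnessOut_make_triangle.1 ≠ pvDiffWitnessOut_make_triangle.2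
def Claim_exact_make_triangle : Prop := ∀ (triangle : List (List String)), Dom_make_triangle triangle → Pre_make_triangle triangle → D_make_triangle triangle → make_triangle triangle ≠ make_triangle_alt triangle

-- ===== LEMMAS AND PROOFS =====

-- closed form of A's top rows (identical to B's comprehension)
def topR (z : Nat) (row : List String) : List String :=
  List.replicate (z - z / 2) " " ++ row.take z ++ List.replicate (z + 1 - (z - z / 2)) " "
-- closed form of A's bottom rows
def botR (z : Nat) (row : List String) : List String :=
  if z = 0 then [" "] else row.take z ++ [" "] ++ (row.take (z - 1) ++ [row.getLastD " "])

-- writing an index's current value back is a no-op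
lemma set_getD_self (g : List (List String)) (r : Nat) : g.set r (g.getD r []) = g := by
  rcases Nat.lt_or_ge r g.length with h | h
  · rw [List.getD_eq_getElem _ _ h]; exact List.set_getElem_self h
  · exact List.set_eq_of_length_le h

-- a grid loop all of whose writes hit row r collapses to one row update
lemma fold2D (G : List (List String) → Nat → List (List String))
    (f : List String → Nat → List String) (r : Nat) :
    ∀ (l : List Nat) (g : List (List String)), r < g.length →
      (∀ g' k, k ∈ l → G g' k = g'.set r (f (g'.getD r []) k)) →
      l.foldl G g = g.set r (l.foldl f (g.getD r [])) := by
  intro l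
  induction l with
  | nil => intro g _ _; exact (set_getD_self g r).symm
  | cons a l ih =>
    intro g hr hG
    rw [List.foldl_cons, List.foldl_cons, hG g a (List.mem_cons_self),
      ih _ (by simpa using hr) (fun g' k hk => hG g' k (List.mem_cons_of_mem _ hk)),
      List.getD_eq_getElem _ _ hr]
    simp [hr]

-- a row loop writing positions x, x+1, …, x+t-1 in order overwrites that segment
lemma writeSeg (row : List String) (x : Nat) :
    ∀ (t : Nat) (init : List String), t ≤ row.length → x + t ≤ init.length →
      (List.range t).foldl (fun ρ j => ρ.set (x + j) (row.getD j " ")) init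
        = init.take x ++ row.take t ++ init.drop (x + t) := by
  intro t
  induction t with
  | zero => intro init _ _; simp
  | succ t ih =>
    intro init ht hx
    rw [List.range_succ, List.foldl_append, ih init (by omega) (by omega)]
    have hxi : x ≤ init.length := by omega
    have htr : t < row.length := by omega
    have hlt : (init.take x ++ row.take t).length = x + t := by
      simp [Nat.min_eq_left hxi, Nat.min_eq_left (Nat.le_of_lt htr)]
    rw [List.foldl_cons, List.foldl_nil, List.append_assoc,
      ← List.append_assoc (init.take x) (row.take t) (init.drop (x + t)),
      List.set_append, if_neg (by omega),
      List.drop_eq_getElem_cons (by omega : x + t < init.length), hlt]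
    simp only [Nat.sub_self, List.set_cons_zero, List.getD_eq_getElem _ _ htr]
    have htc : List.take (t + 1) row = List.take t row ++ [row[t]] := by
      rw [← List.take_concat_get htr, List.concat_eq_append]
    simp only [Nat.add_assoc]
    rw [htc]
    simp
    rw [htc, List.append_assoc, List.singleton_append]

-- an all-blank output row
def blankR (z : Nat) : List String := List.replicate (z * 2 + 1) " "

-- A's outer loop body after pushing the Int casts down to Nat
def stepA (T : List (List String)) (g : List (List String)) (i : Nat) : List (List String) :=
  let z : Nat := (T.headD []).length
  let x : Nat := z - z / 2
  let g1 := (List.range z).foldl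
    (fun g j => g.set i ((g.getD i []).set (x + j) ((T.getD i []).getD j " "))) g
  (List.range (z * 2 + 1)).foldl
    (fun g k =>
      if k = z then g
      else if k < z then
        g.set (T.length + i) ((g.getD (T.length + i) []).set k ((T.getD i []).getD (k % z) " "))
      else
        g.set (T.length + i)
          ((g.getD (T.length + i) []).set k
            (PySem.List.pyGetD (T.getD i []) (((k % z : Nat) : Int) - 1) " "))) g1

lemma A_normal (T : List (List String)) (h0 : T ≠ []) :
    make_triangle T =
      (List.range T.length).foldl (stepA T)
        (List.replicate T.length (blankR (T.headD []).length) ++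
         List.replicate T.length (blankR (T.headD []).length)) := by
  obtain ⟨r0, T', rfl⟩ : ∃ r0 T', T = r0 :: T' := by
    cases T with
    | nil => exact absurd rfl h0
    | cons a t => exact ⟨a, t, rfl⟩
  simp only [make_triangle]
  have hz0 : PySem.List.pyGetD (r0 :: T') 0 [] = r0 := by simp
  have hy1 : ((((r0 :: T').length : Int)) * 2) = (((r0 :: T').length * 2 : Nat) : Int) := by push_cast; ring
  have hz1 : ((r0.length : Int) * 2 + 1) = ((r0.length * 2 + 1 : Nat) : Int) := by push_cast; ring
  have hmapc : ∀ {α : Type} (n : Nat) (c : α),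
      (PySem.List.pyRange 0 (n : Int) 1).map (fun _ => c) = List.replicate n c := by
    intro α n c
    rw [List.map_const']; simp [PySem.List.length_pyRange_one]
  have hget0 : PySem.List.pyGetD
      (List.replicate ((r0 :: T').length * 2) (List.replicate (r0.length * 2 + 1) (" " : String))) 0 []
      = List.replicate (r0.length * 2 + 1) (" " : String) := by
    rw [PySem.List.pyGetD_zero]
    simp [List.getD_eq_getElem?_getD]
  have hx2 : (((r0.length * 2 + 1) / 2 : Nat) : Int) - 1 - (((r0.length / 2 : Nat) : Int) - 1)
      = ((r0.length - r0.length / 2 : Nat) : Int) := by omega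
  have hinit : List.replicate ((r0 :: T').length * 2) (List.replicate (r0.length * 2 + 1) (" " : String))
      = List.replicate (r0 :: T').length (List.replicate (r0.length * 2 + 1) " ") ++
        List.replicate (r0 :: T').length (List.replicate (r0.length * 2 + 1) " ") := by
    rw [← List.replicate_add]; congr 1; omega
  simp only [hz0, hy1, hz1]
  simp only [hmapc]
  have hfd : ∀ m : Nat, PySem.Int.floordiv (m : Int) 2 = ((m / 2 : Nat) : Int) := fun m => by
    rw [show (2 : Int) = ((2 : Nat) : Int) from rfl, PySem.Int.floordiv_natCast]
  simp only [hget0, List.length_replicate, hfd, hx2]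
  simp only [hinit]
  simp only [PySem.List.pyRange_zero_nat, List.foldl_map, ← Nat.cast_add,
    PySem.List.pySetD_natCast, PySem.List.pyGetD_natCast, PySem.Int.mod_natCast,
    Nat.cast_inj, Nat.cast_lt]
  congr 1

lemma getD_append_left (l1 l2 : List String) (j : Nat) (h : j < l1.length) (d : String) :
    (l1 ++ l2).getD j d = l1.getD j d := by
  simp [List.getD_eq_getElem?_getD, List.getElem?_append_left h]

lemma getD_append_len {α : Type} (l1 l2 : List α) (x d : α) :
    (l1 ++ x :: l2).getD l1.length d = x := by
  simp [List.getD_eq_getElem?_getD]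

lemma set_append_len {α : Type} (l1 l2 : List α) (x v : α) :
    (l1 ++ x :: l2).set l1.length v = l1 ++ v :: l2 := by
  simp

-- A's first inner loop, run on a blank row, paints B's top row
lemma topFold (row : List String) (z : Nat) (hz : z ≤ row.length) :
    (List.range z).foldl (fun ρ j => ρ.set ((z - z / 2) + j) (row.getD j " ")) (blankR z)
      = topR z row := by
  rw [writeSeg row (z - z / 2) z (blankR z) hz (by unfold blankR; rw [List.length_replicate]; omega)]
  unfold blankR topR
  rw [List.take_replicate, List.drop_replicate]
  have h1 : min (z - z / 2) (z * 2 + 1) = z - z / 2 := by omega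
  have h2 : z * 2 + 1 - ((z - z / 2) + z) = z + 1 - (z - z / 2) := by omega
  rw [h1, h2]

-- A's second inner loop, run on a blank row, paints the doubled bottom row
lemma botFold (row : List String) (z : Nat) (hz : z ≤ row.length) :
    (List.range (z * 2 + 1)).foldl
      (fun ρ k =>
        if k = z then ρ
        else if k < z then ρ.set k (row.getD (k % z) " ")
        else ρ.set k (PySem.List.pyGetD row (((k % z : Nat) : Int) - 1) " ")) (blankR z)
      = botR z row := by
  rcases Nat.eq_zero_or_pos z with hz0 | hzpos
  · subst hz0; simp [blankR, botR, List.range_succ]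
  · have hne : row ≠ [] := by
      intro e; rw [e] at hz; simp at hz; omega
    have hrow'len : (row.take (z - 1) ++ [row.getLastD " "]).length = z := by
      simp [List.length_take]; omega
    have hsplit : z * 2 + 1 = z + (1 + z) := by omega
    rw [hsplit, List.range_add, List.foldl_append]
    have h1 : (List.range z).foldl
        (fun ρ k =>
          if k = z then ρ
          else if k < z then ρ.set k (row.getD (k % z) " ")
          else ρ.set k (PySem.List.pyGetD row (((k % z : Nat) : Int) - 1) " ")) (blankR z)
        = row.take z ++ List.replicate (z + 1) " " := by
      rw [PySem.List.foldl_congr_mem _ _ (fun ρ j => ρ.set (0 + j) (row.getD j " ")) _ ?_]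
      · rw [writeSeg row 0 z (blankR z) hz (by unfold blankR; rw [List.length_replicate]; omega)]
        unfold blankR
        rw [List.drop_replicate]
        have h2 : z * 2 + 1 - (0 + z) = z + 1 := by omega
        rw [h2]; simp
      · intro acc k hk
        rw [List.mem_range] at hk
        rw [if_neg (by omega), if_pos hk, Nat.mod_eq_of_lt hk]
        simp
    rw [h1, List.foldl_map, List.range_add, List.foldl_append]
    have h3 : (List.range 1).foldl
        (fun ρ j =>
          if z + j = z then ρ
          else if z + j < z then ρ.set (z + j) (row.getD ((z + j) % z) " ")
          else ρ.set (z + j) (PySem.List.pyGetD row ((((z + j) % z : Nat) : Int) - 1) " "))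
        (row.take z ++ List.replicate (z + 1) " ")
        = row.take z ++ List.replicate (z + 1) " " := by
      simp [List.range_succ]
    rw [h3, List.foldl_map]
    have h4 : ∀ (acc : List String), ∀ j ∈ List.range z,
        (if z + (1 + j) = z then acc
         else if z + (1 + j) < z then acc.set (z + (1 + j)) (row.getD ((z + (1 + j)) % z) " ")
         else acc.set (z + (1 + j))
           (PySem.List.pyGetD row ((((z + (1 + j)) % z : Nat) : Int) - 1) " "))
        = acc.set ((z + 1) + j) ((row.take (z - 1) ++ [row.getLastD " "]).getD j " ") := by
      intro acc j hj
      rw [List.mem_range] at hj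
      rw [if_neg (by omega), if_neg (by omega), show z + (1 + j) = (z + 1) + j by omega]
      congr 1
      rcases Nat.lt_or_ge j (z - 1) with hlt | hge
      · have hm : ((z + 1) + j) % z = 1 + j := by
          rw [show (z + 1) + j = z + (1 + j) by omega, Nat.add_mod_left, Nat.mod_eq_of_lt (by omega)]
        rw [hm, show ((1 + j : Nat) : Int) - 1 = (j : Int) by push_cast; ring,
          PySem.List.pyGetD_natCast, getD_append_left _ _ j (by simp [List.length_take]; omega)]
        simp [List.getD_eq_getElem?_getD, hlt]
      · have hj1 : j = z - 1 := by omega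
        have hm : ((z + 1) + j) % z = 0 := by
          rw [show (z + 1) + j = z + z by omega, Nat.add_mod_left, Nat.mod_self]
        have hgd : (row.take (z - 1) ++ [row.getLastD " "]).getD (z - 1) " " = row.getLastD " " := by
          have hlen2 : (row.take (z - 1)).length = z - 1 := by simp [List.length_take]; omega
          rw [List.getD_eq_getElem?_getD, List.getElem?_append_right (le_of_eq hlen2)]
          simp [hlen2]
        rw [hm, show ((0 : Nat) : Int) - 1 = (-1 : Int) by ring, PySem.List.pyGetD_neg_one _ _ hne,
          hj1, hgd, List.getLastD_eq_getLast?, List.getLast?_eq_some_getLast hne]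
        rfl
    rw [PySem.List.foldl_congr_mem _ _ _ _ h4,
      writeSeg (row.take (z - 1) ++ [row.getLastD " "]) (z + 1) z
        (List.take z row ++ List.replicate (z + 1) " ") (by omega)
        (by rw [List.length_append, List.length_take]; simp; omega)]
    have h5 : (row.take z ++ List.replicate (z + 1) " ").take (z + 1)
        = row.take z ++ [" "] := by
      rw [List.take_append]
      have : (row.take z).length = z := by simp [List.length_take]; omega
      rw [this, List.take_take, Nat.min_eq_right (by omega), List.take_replicate,
        Nat.min_eq_left (by omega)]
      simp
    have h6 : (row.take z ++ List.replicate (z + 1) " ").drop ((z + 1) + z) = [] := by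
      apply List.drop_eq_nil_of_le
      simp [List.length_take]; omega
    rw [h5, h6, List.take_of_length_le (le_of_eq hrow'len)]
    unfold botR
    rw [if_neg (by omega)]
    simp


lemma outer_inv (T : List (List String)) (hlen : ∀ row ∈ T, (T.headD []).length ≤ row.length) :
    ∀ t, t ≤ T.length →
      (List.range t).foldl (stepA T)
        (List.replicate T.length (blankR (T.headD []).length) ++
         List.replicate T.length (blankR (T.headD []).length))
      = (T.map (topR (T.headD []).length)).take t ++
          List.replicate (T.length - t) (blankR (T.headD []).length) ++
          ((T.map (botR (T.headD []).length)).take t ++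
           List.replicate (T.length - t) (blankR (T.headD []).length)) := by
  intro t
  induction t with
  | zero => intro _; simp
  | succ t ih =>
    intro ht
    have hty : t < T.length := by omega
    rw [List.range_succ, List.foldl_append, ih (by omega), List.foldl_cons, List.foldl_nil]
    have hrowget : T.getD t [] = T[t] := by rw [List.getD_eq_getElem _ _ hty]
    have hrowlen : (T.headD []).length ≤ T[t].length := hlen T[t] (List.getElem_mem hty)
    simp only [stepA]
    -- local names (plain abbreviations, no tactic state tricks)
    have htakelen : ((T.map (topR (T.headD []).length)).take t).length = t := by
      simp; omega
    have hbtakelen : ((T.map (botR (T.headD []).length)).take t).length = t := by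
      simp; omega
    have hWshape : (T.map (topR (T.headD []).length)).take t ++
          List.replicate (T.length - t) (blankR (T.headD []).length) ++
          ((T.map (botR (T.headD []).length)).take t ++
           List.replicate (T.length - t) (blankR (T.headD []).length))
        = (T.map (topR (T.headD []).length)).take t ++
            blankR (T.headD []).length ::
              (List.replicate (T.length - t - 1) (blankR (T.headD []).length) ++
               ((T.map (botR (T.headD []).length)).take t ++
                List.replicate (T.length - t) (blankR (T.headD []).length))) := by
      rw [show T.length - t = (T.length - t - 1) + 1 by omega, List.replicate_succ]
      simp [List.append_assoc]
    have hWlen : t < ((T.map (topR (T.headD []).length)).take t ++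
          List.replicate (T.length - t) (blankR (T.headD []).length) ++
          ((T.map (botR (T.headD []).length)).take t ++
           List.replicate (T.length - t) (blankR (T.headD []).length))).length := by
      simp; omega
    have hWget : ((T.map (topR (T.headD []).length)).take t ++
          List.replicate (T.length - t) (blankR (T.headD []).length) ++
          ((T.map (botR (T.headD []).length)).take t ++
           List.replicate (T.length - t) (blankR (T.headD []).length))).getD t []
        = blankR (T.headD []).length := by
      rw [hWshape]
      have h := getD_append_len ((T.map (topR (T.headD []).length)).take t)
        (List.replicate (T.length - t - 1) (blankR (T.headD []).length) ++
          ((T.map (botR (T.headD []).length)).take t ++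
           List.replicate (T.length - t) (blankR (T.headD []).length)))
        (blankR (T.headD []).length) ([] : List String)
      rw [htakelen] at h
      exact h
    rw [fold2D
        (fun g j => g.set t ((g.getD t []).set
          ((T.headD []).length - (T.headD []).length / 2 + j) ((T.getD t []).getD j " ")))
        (fun ρ j => ρ.set
          ((T.headD []).length - (T.headD []).length / 2 + j) (T[t].getD j " "))
        t (List.range (T.headD []).length) _ hWlen
        (by intro g' k hk; rw [hrowget]),
      hWget, topFold T[t] (T.headD []).length hrowlen]
    -- the grid after painting the top row, reshaped for the second write
    have hW1shape : ((T.map (topR (T.headD []).length)).take t ++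
          List.replicate (T.length - t) (blankR (T.headD []).length) ++
          ((T.map (botR (T.headD []).length)).take t ++
           List.replicate (T.length - t) (blankR (T.headD []).length))).set t
            (topR (T.headD []).length T[t])
        = ((T.map (topR (T.headD []).length)).take t ++
            topR (T.headD []).length T[t] ::
              List.replicate (T.length - t - 1) (blankR (T.headD []).length) ++
            (T.map (botR (T.headD []).length)).take t) ++
          blankR (T.headD []).length ::
            List.replicate (T.length - t - 1) (blankR (T.headD []).length) := by
      rw [hWshape]
      have h := set_append_len ((T.map (topR (T.headD []).length)).take t)
        (List.replicate (T.length - t - 1) (blankR (T.headD []).length) ++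
          ((T.map (botR (T.headD []).length)).take t ++
           List.replicate (T.length - t) (blankR (T.headD []).length)))
        (blankR (T.headD []).length) (topR (T.headD []).length T[t])
      rw [htakelen] at h
      rw [h, show T.length - t = (T.length - t - 1) + 1 by omega, List.replicate_succ]
      simp [List.append_assoc]
    have hplen : ((T.map (topR (T.headD []).length)).take t ++
            topR (T.headD []).length T[t] ::
              List.replicate (T.length - t - 1) (blankR (T.headD []).length) ++
            (T.map (botR (T.headD []).length)).take t).length = T.length + t := by
      simp; omega
    have hW1len : T.length + t < (((T.map (topR (T.headD []).length)).take t ++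
          List.replicate (T.length - t) (blankR (T.headD []).length) ++
          ((T.map (botR (T.headD []).length)).take t ++
           List.replicate (T.length - t) (blankR (T.headD []).length))).set t
            (topR (T.headD []).length T[t])).length := by
      rw [hW1shape]; simp; omega
    have hW1get : (((T.map (topR (T.headD []).length)).take t ++
          List.replicate (T.length - t) (blankR (T.headD []).length) ++
          ((T.map (botR (T.headD []).length)).take t ++
           List.replicate (T.length - t) (blankR (T.headD []).length))).set t
            (topR (T.headD []).length T[t])).getD (T.length + t) []
        = blankR (T.headD []).length := by
      rw [hW1shape]
      have h := getD_append_len ((T.map (topR (T.headD []).length)).take t ++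
            topR (T.headD []).length T[t] ::
              List.replicate (T.length - t - 1) (blankR (T.headD []).length) ++
            (T.map (botR (T.headD []).length)).take t)
        (List.replicate (T.length - t - 1) (blankR (T.headD []).length))
        (blankR (T.headD []).length) ([] : List String)
      rw [hplen] at h
      exact h
    rw [fold2D
        (fun g k =>
          if k = (T.headD []).length then g
          else if k < (T.headD []).length then
            g.set (T.length + t) ((g.getD (T.length + t) []).set k
              ((T.getD t []).getD (k % (T.headD []).length) " "))
          else
            g.set (T.length + t) ((g.getD (T.length + t) []).set k
              (PySem.List.pyGetD (T.getD t [])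
                (((k % (T.headD []).length : Nat) : Int) - 1) " ")))
        (fun ρ k =>
          if k = (T.headD []).length then ρ
          else if k < (T.headD []).length then ρ.set k (T[t].getD (k % (T.headD []).length) " ")
          else ρ.set k (PySem.List.pyGetD T[t] (((k % (T.headD []).length : Nat) : Int) - 1) " "))
        (T.length + t) (List.range ((T.headD []).length * 2 + 1)) _ hW1len
        (by
          intro g' k hk
          beta_reduce
          by_cases hkz : k = (T.headD []).length
          · rw [if_pos hkz, if_pos hkz]
            exact (set_getD_self g' (T.length + t)).symm
          · rw [if_neg hkz, if_neg hkz]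
            by_cases hklt : k < (T.headD []).length
            · rw [if_pos hklt, if_pos hklt, hrowget]
            · rw [if_neg hklt, if_neg hklt, hrowget]),
      hW1get, botFold T[t] (T.headD []).length hrowlen]
    -- reassemble
    rw [hW1shape]
    have hset := set_append_len ((T.map (topR (T.headD []).length)).take t ++
            topR (T.headD []).length T[t] ::
              List.replicate (T.length - t - 1) (blankR (T.headD []).length) ++
            (T.map (botR (T.headD []).length)).take t)
      (List.replicate (T.length - t - 1) (blankR (T.headD []).length))
      (blankR (T.headD []).length) (botR (T.headD []).length T[t])
    rw [hplen] at hset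
    rw [hset]
    have htop1 : (T.map (topR (T.headD []).length)).take (t + 1)
        = (T.map (topR (T.headD []).length)).take t ++ [topR (T.headD []).length T[t]] := by
      rw [← List.take_concat_get (by simp; omega), List.concat_eq_append, List.getElem_map]
    have hbot1 : (T.map (botR (T.headD []).length)).take (t + 1)
        = (T.map (botR (T.headD []).length)).take t ++ [botR (T.headD []).length T[t]] := by
      rw [← List.take_concat_get (by simp; omega), List.concat_eq_append, List.getElem_map]
    rw [htop1, hbot1, show T.length - (t + 1) = T.length - t - 1 by omega]
    simp [List.append_assoc]

lemma A_closed (T : List (List String)) (h0 : T ≠ [])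
    (hlen : ∀ row ∈ T, (T.headD []).length ≤ row.length) :
    make_triangle T = T.map (topR (T.headD []).length) ++ T.map (botR (T.headD []).length) := by
  rw [A_normal T h0, outer_inv T hlen T.length le_rfl]
  simp only [Nat.sub_self, List.replicate_zero, List.append_nil]
  rw [List.take_of_length_le (by simp), List.take_of_length_le (by simp)]

lemma B_closed (T : List (List String)) :
    make_triangle_alt T =
      T.map (topR (T.headD []).length) ++
      T.map (fun row => row.take (T.headD []).length ++ [" "] ++ row.take (T.headD []).length) := by
  simp only [make_triangle_alt]
  have hz : (PySem.List.pyGetD T 0 []).length = (T.headD []).length := by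
    cases T <;> simp [PySem.List.pyGetD_zero]
  simp only [hz, PySem.List.slice_to_natCast]
  congr 1

-- ===== VERDICT (by name: the statement is the Claim_ definition above) =====
-- bottom rows coincide outside D_
lemma bot_eq (T : List (List String)) (hlen : ∀ row ∈ T, (T.headD []).length ≤ row.length)
    (hnD : ¬ D_make_triangle T) (row : List String) (hmem : row ∈ T) :
    botR (T.headD []).length row =
      row.take (T.headD []).length ++ [" "] ++ row.take (T.headD []).length := by
  rcases Nat.eq_zero_or_pos (T.headD []).length with h0z | hpos
  · unfold botR
    rw [if_pos h0z, h0z]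
    simp
  · have hlr : (T.headD []).length ≤ row.length := hlen row hmem
    have hne : row ≠ [] := by intro e; rw [e] at hlr; simp only [List.length_nil] at hlr; omega
    unfold D_make_triangle at hnD
    push_neg at hnD
    have hgl : row.getLast? = row[(T.headD []).length - 1]? := by
      rcases Nat.lt_or_ge (T.headD []).length row.length with hlt | hge
      · exact hnD hpos row hmem hlt
      · have hEq : row.length = (T.headD []).length := by omega
        rw [List.getLast?_eq_getElem?]
        congr 1
        omega
    have hgl2 : row.getLastD " " = row[(T.headD []).length - 1]'(by omega) := by
      rw [List.getLastD_eq_getLast?, hgl, List.getElem?_eq_getElem (by omega)]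
      rfl
    unfold botR
    rw [if_neg (by omega)]
    have h2 := List.take_concat_get (l := row) (i := (T.headD []).length - 1) (by omega)
    rw [List.concat_eq_append, show (T.headD []).length - 1 + 1 = (T.headD []).length by omega] at h2
    rw [hgl2, h2]

theorem make_triangle_spec : Claim_unchanged_make_triangle := by
  intro T hDom hPre hnD
  obtain ⟨h0, hlen⟩ := hPre
  rw [A_closed T h0 hlen, B_closed T]
  congr 1
  exact List.map_congr_left (fun row hmem => bot_eq T hlen hnD row hmem)

theorem make_triangle_changed : Claim_changed_make_triangle := by
  unfold Claim_changed_make_triangle; decide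

theorem make_triangle_tight : Claim_exact_make_triangle := by
  intro T hDom hPre hD heq
  obtain ⟨h0, hlen⟩ := hPre
  obtain ⟨hz1, row, hmem, hlt, hne⟩ := hD
  rw [A_closed T h0 hlen, B_closed T] at heq
  have h2 := List.append_cancel_left heq
  obtain ⟨i, hi, hrowi⟩ := List.mem_iff_getElem.mp hmem
  have h3 := congrArg (fun l => l[i]?) h2
  simp only [List.getElem?_map, List.getElem?_eq_getElem hi, Option.map_some, hrowi] at h3
  have h4 : botR (T.headD []).length row =
      row.take (T.headD []).length ++ [" "] ++ row.take (T.headD []).length :=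
    Option.some.inj h3
  unfold botR at h4
  rw [if_neg (by omega)] at h4
  have hlr : (T.headD []).length ≤ row.length := hlen row hmem
  have hrne : row ≠ [] := by intro e; rw [e] at hlr; simp only [List.length_nil] at hlr; omega
  have h5 := List.take_concat_get (l := row) (i := (T.headD []).length - 1) (by omega)
  rw [List.concat_eq_append, show (T.headD []).length - 1 + 1 = (T.headD []).length by omega] at h5
  have h6 : row.take ((T.headD []).length - 1) ++ [row.getLastD " "]
      = row.take (T.headD []).length := List.append_cancel_left h4
  have h7 := h6.trans h5.symm
  have h8 : row.getLastD " " = row[(T.headD []).length - 1]'(by omega) := by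
    have h8' := List.append_cancel_left h7
    simpa using h8'
  apply hne
  have h9 : row.getLast hrne = row[(T.headD []).length - 1]'(by omega) := by
    rw [← h8, List.getLastD_eq_getLast?, List.getLast?_eq_some_getLast hrne]
    rfl
  rw [List.getElem?_eq_getElem (show (T.headD []).length - 1 < row.length by omega),
    List.getLast?_eq_some_getLast hrne]
  exact congrArg some h9
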